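-- pv_equiv track=rewrite | github.com/lucamjdimarco/ProgettoAMOD | Python/.history/Euristico/euristico_20230717140508.py | sortNEHFirstIteration
-- ===== SOURCE A (Python) =====
-- M = [1, 2, 3, 4]
--
-- num_M = 4
--
-- p = {(1, 1): 10,
--      (1, 2): 2,
--      (1, 3): 6,
--      (1, 4): 4,
--      (2, 1): 8,
--      (2, 2): 8,
--      (2, 3): 12,
--      (2, 4): 5,
--      (3, 1): 4,
--      (3, 2): 7,
--      (3, 3): 4,
--      (3, 4): 7,
--      (4, 1): 12,
--      (4, 2): 10,
--      (4, 3): 2,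
--      (4, 4): 10,
--      (5, 1): 5,
--      (5, 2): 4,
--      (5, 3): 8,
--      (5, 4): 11}
--
-- def sortNEHFirstIteration(seq):
--     Cmax = 0
--     seqNEH = []
--     Ctemp1 = {}
--     Ctemp2 = {}
--
--     for m in M:
--         for j in range(0,len(seq)):
--             if m == 1:
--                 if j == 0:
--                     Ctemp1[seq[j], m] = p[seq[j], m]
--                 else:
--                     Ctemp1[seq[j], m] = Ctemp1[seq[j-1], m] + p[seq[j], m]
--             else:
--                 if j == 0:
--                     Ctemp1[seq[j], m] = Ctemp1[seq[j], m-1] + p[seq[j], m]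
--                 else:
--                     Ctemp1[seq[j], m] = max(Ctemp1[seq[j-1], m], Ctemp1[seq[j], m-1]) + p[seq[j], m]
--
--     seq2 = seq.copy()
--     seq2.reverse()
--
--     for m in M:
--         for j in range(0, len(seq2)):
--             if m == 1:
--                 if j == 0:
--                     Ctemp2[seq2[j], m] = p[seq2[j], m]
--                 else:
--                     Ctemp2[seq2[j], m] = Ctemp2[seq2[j-1], m] + p[seq2[j], m]
--             else:
--                 if j == 0:
--                     Ctemp2[seq2[j], m] = Ctemp2[seq2[j], m-1] + p[seq2[j], m]
--                 else:
--                     Ctemp2[seq2[j], m] = max(Ctemp2[seq2[j-1], m], Ctemp2[seq2[j], m-1]) + p[seq2[j], m]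
--
--
--     #seq[-1] indica l'ultimo elemento della lista
--     if Ctemp1[seq[-1], num_M] <= Ctemp2[seq2[-1], num_M]:
--         return Ctemp1[seq[-1], num_M], seq
--     else:
--         return Ctemp2[seq2[-1], num_M], seq2
-- ===== SOURCE B (Python) =====
-- M = [1, 2, 3, 4]
--
-- num_M = 4
--
-- p = {(1, 1): 10, (1, 2): 2, (1, 3): 6, (1, 4): 4,
--      (2, 1): 8, (2, 2): 8, (2, 3): 12, (2, 4): 5,
--      (3, 1): 4, (3, 2): 7, (3, 3): 4, (3, 4): 7,
--      (4, 1): 12, (4, 2): 10, (4, 3): 2, (4, 4): 10,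
--      (5, 1): 5, (5, 2): 4, (5, 3): 8, (5, 4): 11}
--
--
-- def _makespan(s):
--     # Critical-path formulation: instead of the completion-time recurrence
--     # C[j] = max(C[j-1], L[s[j]]) + p, each machine pass is written as
--     # "prefix sum plus running maximum of offsets":
--     #   C[j] = P[j] + max_{i<=j} (L[s[i]] - P[i-1]),
--     # where P is the prefix sum of this machine's processing times along the
--     # sequence and L maps each job to the previous machine's value at that
--     # job's LAST occurrence (a plain dict comprehension: later writes win).
--     t = 0
--     C = []
--     for job in s:           # machine 1: plain prefix sums
--         t += p[job, 1]
--         C.append(t)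
--     for m in range(2, num_M + 1):
--         L = {s[j]: C[j] for j in range(len(s))}
--         t = 0               # P[j-1], prefix sum of machine-m times
--         h = L[s[0]]         # running max of L[s[i]] - P[i-1]
--         C = []
--         for job in s:
--             h = max(h, L[job] - t)
--             t += p[job, m]
--             C.append(t + h)
--     return C[-1]
--
--
-- def sortNEHFirstIteration(seq):
--     fwd = _makespan(seq)
--     seq2 = list(reversed(seq))
--     rev = _makespan(seq2)
--     if fwd <= rev:
--         return fwd, seq
--     return rev, seq2
-- ===== Notes on version B (the rewrite author's own statement) =====
-- stated objective: alternative
-- what changed: Replaces A's two-term completion-time recurrence max(C[j-1][m], C[j][m-1]) + p over one (job, machine)-keyed dict by the critical-path form: each machine pass is a prefix sum plus a running maximum of offsets L[s[i]] - P[i-1], with the previous machine's last-occurrence values captured once per machine by a dict comprehension.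
import Mathlib
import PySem

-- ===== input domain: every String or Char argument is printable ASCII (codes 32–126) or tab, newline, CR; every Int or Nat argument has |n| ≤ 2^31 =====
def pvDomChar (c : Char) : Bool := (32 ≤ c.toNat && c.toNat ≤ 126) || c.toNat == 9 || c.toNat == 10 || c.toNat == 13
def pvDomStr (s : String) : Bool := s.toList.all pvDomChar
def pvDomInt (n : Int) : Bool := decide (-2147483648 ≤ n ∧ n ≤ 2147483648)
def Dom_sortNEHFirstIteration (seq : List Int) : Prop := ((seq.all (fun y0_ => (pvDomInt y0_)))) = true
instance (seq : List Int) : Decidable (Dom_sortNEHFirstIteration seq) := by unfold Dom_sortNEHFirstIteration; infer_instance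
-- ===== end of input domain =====

-- B replaces A's two-term completion-time recurrence over one (job, machine)-keyed dict by the
-- critical-path form of each machine pass — prefix sum plus a running maximum of offsets, with
-- last-occurrence values captured once per machine by a dict comprehension (alternative, same cost).


-- ===== PORT A =====
-- the module constants M, num_M and the processing-time dict p
def pvM : List Int := [1, 2, 3, 4]
def pvNumM : Int := 4
def pvP : PySem.Dict (Int × Int) Int := PySem.Dict.ofList
  [((1, 1), 10), ((1, 2), 2), ((1, 3), 6), ((1, 4), 4),
   ((2, 1), 8), ((2, 2), 8), ((2, 3), 12), ((2, 4), 5),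
   ((3, 1), 4), ((3, 2), 7), ((3, 3), 4), ((3, 4), 7),
   ((4, 1), 12), ((4, 2), 10), ((4, 3), 2), ((4, 4), 10),
   ((5, 1), 5), ((5, 2), 4), ((5, 3), 8), ((5, 4), 11)]

-- the body of A's inner loop (identical in both of A's nested-loop blocks);
-- p[...] and Ctemp[...] lookups use getD 0: exact under Pre_ (every key present, no KeyError)
def pvBody (s : List Int) (m : Int) (C : PySem.Dict (Int × Int) Int) (j : Int) :
    PySem.Dict (Int × Int) Int :=
  let sj := PySem.List.pyGetD s j 0
  if m == 1 then
    if j == 0 then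
      C.insert (sj, m) (pvP.getD (sj, m) 0)
    else
      C.insert (sj, m) (C.getD (PySem.List.pyGetD s (j - 1) 0, m) 0 + pvP.getD (sj, m) 0)
  else
    if j == 0 then
      C.insert (sj, m) (C.getD (sj, m - 1) 0 + pvP.getD (sj, m) 0)
    else
      C.insert (sj, m)
        (max (C.getD (PySem.List.pyGetD s (j - 1) 0, m) 0) (C.getD (sj, m - 1) 0)
          + pvP.getD (sj, m) 0)

-- one of A's two identical nested-loop blocks (machines outer, job positions inner)
def pvFill (s : List Int) : PySem.Dict (Int × Int) Int :=
  pvM.foldl (fun C m => (PySem.List.pyRange 0 s.length 1).foldl (pvBody s m) C)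
    PySem.Dict.empty

def sortNEHFirstIteration (seq : List Int) : Int × List Int :=
  let ctemp1 := pvFill seq
  let seq2 := seq.reverse          -- seq.copy(); seq2.reverse()
  let ctemp2 := pvFill seq2
  -- seq[-1] / seq2[-1]: exact under Pre_ (seq nonempty, so no IndexError)
  let last1 := ctemp1.getD (PySem.List.pyGetD seq (-1) 0, pvNumM) 0
  let last2 := ctemp2.getD (PySem.List.pyGetD seq2 (-1) 0, pvNumM) 0
  if last1 ≤ last2 then (last1, seq) else (last2, seq2)

-- ===== PORT B =====
-- machine-1 loop of _makespan: t += p[job, 1]; C.append(t)  (plain prefix sums)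
def pvRow1Step (st : Int × List Int) (job : Int) : Int × List Int :=
  let t := st.1 + pvP.getD (job, 1) 0
  (t, st.2 ++ [t])

-- L = {s[j]: C[j] for j in range(len(s))}: later writes win = last occurrence
def pvLastD (s C : List Int) : PySem.Dict Int Int :=
  (PySem.List.pyRange 0 (s.length : Int) 1).foldl
    (fun L j => L.insert (PySem.List.pyGetD s j 0) (PySem.List.pyGetD C j 0))
    PySem.Dict.empty

-- machine-m loop of _makespan: h = max(h, L[job] - t); t += p[job, m]; C.append(t + h)
def pvPassStep (m : Int) (L : PySem.Dict Int Int) (st : Int × Int × List Int) (job : Int) :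
    Int × Int × List Int :=
  let h := max st.2.1 (L.getD job 0 - st.1)
  let t := st.1 + pvP.getD (job, m) 0
  (t, h, st.2.2 ++ [t + h])

-- one machine-m pass: t = 0; h = L[s[0]]; then the loop over s
def pvPass (s : List Int) (m : Int) (L : PySem.Dict Int Int) : List Int :=
  (s.foldl (pvPassStep m L) (0, L.getD (PySem.List.pyGetD s 0 0) 0, [])).2.2

def pvMakespan (s : List Int) : Int :=
  let C := (PySem.List.pyRange 2 (pvNumM + 1) 1).foldl
    (fun C m => pvPass s m (pvLastD s C)) (s.foldl pvRow1Step (0, [])).2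
  PySem.List.pyGetD C (-1) 0

def sortNEHFirstIteration_alt (seq : List Int) : Int × List Int :=
  let fwd := pvMakespan seq
  let seq2 := seq.reverse          -- list(reversed(seq))
  let rev := pvMakespan seq2
  if fwd ≤ rev then (fwd, seq) else (rev, seq2)

-- ===== PRECONDITION & SPEC =====
-- Pre_ excludes the empty list (A raises IndexError at seq[-1]) and elements outside the
-- 5 job ids of the dict p (A raises KeyError); it admits every input A returns on.
def Pre_sortNEHFirstIteration (seq : List Int) : Prop :=
  seq ≠ [] ∧ ∀ x ∈ seq, x ∈ ([1, 2, 3, 4, 5] : List Int)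
instance (seq : List Int) : Decidable (Pre_sortNEHFirstIteration seq) := by
  unfold Pre_sortNEHFirstIteration; infer_instance

def pvWitness_sortNEHFirstIteration : List Int := [2, 5, 1, 3, 4]

def Spec_sortNEHFirstIteration (seq : List Int) (out : Int × List Int) : Prop :=
  out = sortNEHFirstIteration_alt seq
instance (seq : List Int) (out : Int × List Int) : Decidable (Spec_sortNEHFirstIteration seq out) := by
  unfold Spec_sortNEHFirstIteration; infer_instance

-- ===== CLAIM (what is proved, stated in full; the proofs are below) =====
def Claim_equal_sortNEHFirstIteration : Prop := ∀ (seq : List Int),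
  Dom_sortNEHFirstIteration seq → Pre_sortNEHFirstIteration seq →
  Spec_sortNEHFirstIteration seq (sortNEHFirstIteration seq)

-- ===== LEMMAS AND PROOFS =====
-- proof-side prefix version of B's dict comprehension: the first k entries only
def pvLastPre (s C : List Int) (k : Nat) : PySem.Dict Int Int :=
  (List.range k).foldl (fun L j => L.insert (s.getD j 0) (C.getD j 0)) PySem.Dict.empty

theorem pvLastPre_succ (s C : List Int) (k : Nat) :
    pvLastPre s C (k + 1) = (pvLastPre s C k).insert (s.getD k 0) (C.getD k 0) := by
  simp [pvLastPre, List.range_succ]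

theorem pvLastPre_append (s C : List Int) (x : Int) (k : Nat) (hC : C.length = k) :
    pvLastPre s (C ++ [x]) (k + 1) = (pvLastPre s C k).insert (s.getD k 0) x := by
  rw [pvLastPre_succ]
  congr 1
  · unfold pvLastPre
    apply List.foldl_ext
    intro L j hj
    have hjk : j < k := List.mem_range.mp hj
    rw [List.getD_append _ _ _ _ (by omega)]
  · rw [List.getD_eq_getElem _ _ (by simp [hC]),
      List.getElem_append_right (by omega)]
    simp [hC]

theorem pvLastPre_getD_last (s C : List Int) (k : Nat) (hk : 0 < k) :
    (pvLastPre s C k).getD (s.getD (k - 1) 0) 0 = C.getD (k - 1) 0 := by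
  obtain ⟨k', rfl⟩ : ∃ k', k = k' + 1 := ⟨k - 1, by omega⟩
  rw [pvLastPre_succ]
  simp [PySem.Dict.getD_insert_self]

-- B's comprehension over the whole list is the prefix version at k = length
theorem pvLastD_eq (s C : List Int) : pvLastD s C = pvLastPre s C s.length := by
  unfold pvLastD
  generalize s.length = n
  induction n with
  | zero =>
    rw [show ((0 : Nat) : Int) = 0 from rfl, PySem.List.pyRange_one_eq_nil le_rfl]
    rfl
  | succ n ih =>
    rw [show ((n + 1 : Nat) : Int) = (n : Int) + 1 by push_cast; ring,
      PySem.List.pyRange_one_succ_right (by exact_mod_cast Nat.zero_le n),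
      List.foldl_append, List.foldl_cons, List.foldl_nil, ih, pvLastPre_succ,
      PySem.List.pyGetD_natCast, PySem.List.pyGetD_natCast]

-- the prefix step of B's foldl over s
theorem pv_take_succ {s : List Int} {k : Nat} (hk : k < s.length) :
    s.take (k + 1) = s.take k ++ [s.getD k 0] := by
  rw [List.take_add_one]
  congr 1
  rw [List.getElem?_eq_getElem hk, List.getD_eq_getElem _ _ hk]
  rfl

-- A's machine-1 pass keeps, at keys (·, 1), exactly the last-occurrence map of B's prefix-sum
-- list, and B's running t is the last element of that list.
theorem pv_pass1_inv (s : List Int) : ∀ k : Nat, k ≤ s.length →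
    (((s.take k).foldl pvRow1Step (0, [])).2.length = k)
    ∧ (0 < k → ((s.take k).foldl pvRow1Step (0, [])).2.getD (k - 1) 0
        = ((s.take k).foldl pvRow1Step (0, [])).1)
    ∧ (∀ jb mm : Int,
        (((PySem.List.pyRange 0 (k : Int) 1).foldl (pvBody s 1) PySem.Dict.empty).getD (jb, mm) 0)
          = if mm = 1
            then (pvLastPre s ((s.take k).foldl pvRow1Step (0, [])).2 k).getD jb 0
            else 0) := by
  intro k
  induction k with
  | zero =>
    intro _
    refine ⟨rfl, fun h => absurd h (lt_irrefl 0), fun jb mm => ?_⟩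
    rw [show ((0 : Nat) : Int) = 0 from rfl, PySem.List.pyRange_one_eq_nil le_rfl]
    simp only [List.foldl_nil]
    by_cases hmm : mm = 1 <;> simp [hmm, pvLastPre, PySem.Dict.getD_empty]
  | succ n ih =>
    intro hn1
    have hn : n < s.length := by omega
    obtain ⟨IHa, IHb, IHc⟩ := ih (by omega)
    rw [pv_take_succ hn]
    rw [show ((n + 1 : Nat) : Int) = (n : Int) + 1 by push_cast; ring,
      PySem.List.pyRange_one_succ_right (by exact_mod_cast Nat.zero_le n),
      List.foldl_append, List.foldl_append, List.foldl_cons, List.foldl_cons,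
      List.foldl_nil, List.foldl_nil]
    set R := (s.take n).foldl pvRow1Step (0, []) with hR
    set DA := (PySem.List.pyRange 0 (n : Int) 1).foldl (pvBody s 1) PySem.Dict.empty with hDA
    -- the new value written by both sides
    have hval : pvBody s 1 DA (n : Int) =
        DA.insert (s.getD n 0, 1) (pvRow1Step R (s.getD n 0)).1 := by
      simp only [pvBody, pvRow1Step, beq_self_eq_true, if_true, PySem.List.pyGetD_natCast]
      by_cases h0 : ((n : Nat) : Int) = 0
      · have hn0 : n = 0 := by omega
        rw [if_pos (by simp [h0])]
        have : R.1 = 0 := by rw [hR, hn0]; rfl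
        rw [this, zero_add]
      · rw [if_neg (by simp only [beq_iff_eq]; omega)]
        have hpos : 0 < n := by omega
        rw [show ((n : Int) - 1) = ((n - 1 : Nat) : Int) by push_cast [hpos]; omega,
          PySem.List.pyGetD_natCast, IHc (s.getD (n - 1) 0) 1, if_pos rfl,
          pvLastPre_getD_last s R.2 n hpos, IHb hpos]
    refine ⟨by simp [pvRow1Step, IHa], ?_, ?_⟩
    · intro _
      simp only [pvRow1Step]
      rw [List.getD_eq_getElem _ _ (by simp [IHa]),
        List.getElem_append_right (by omega)]
      simp [IHa]
    · intro jb mm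
      rw [hval, PySem.Dict.getD_insert]
      have hlp : pvLastPre s (pvRow1Step R (s.getD n 0)).2 (n + 1)
          = (pvLastPre s R.2 n).insert (s.getD n 0) (pvRow1Step R (s.getD n 0)).1 :=
        pvLastPre_append s R.2 _ n IHa
      by_cases heq : (jb, mm) = (s.getD n 0, 1)
      · obtain ⟨h1, h2⟩ := Prod.mk.injEq .. ▸ heq
        rw [if_pos heq, h2, if_pos rfl, hlp, h1, PySem.Dict.getD_insert_self]
      · rw [if_neg heq, IHc jb mm]
        by_cases hmm : mm = 1
        · have hjb : jb ≠ s.getD n 0 := fun h => heq (by rw [h, hmm])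
          rw [if_pos hmm, if_pos hmm, hlp, PySem.Dict.getD_insert_of_ne _ _ _ hjb]
        · rw [if_neg hmm, if_neg hmm]

-- A's machine-m pass (m ≠ 1), reading machine m-1 through the dict, keeps at keys (·, m)
-- exactly the last-occurrence map of B's "prefix sum + running max" list, leaves the other
-- machines' entries unchanged, and B's t + h is the last element of that list.
theorem pv_passm_inv (s : List Int) (m : Int) (hm : (m == 1) = false)
    (D0 : PySem.Dict (Int × Int) Int) (L : PySem.Dict Int Int)
    (hprev : ∀ jb : Int, D0.getD (jb, m - 1) 0 = L.getD jb 0)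
    (hzero : ∀ jb : Int, D0.getD (jb, m) 0 = 0) : ∀ k : Nat, k ≤ s.length →
    (((s.take k).foldl (pvPassStep m L) (0, L.getD (PySem.List.pyGetD s 0 0) 0, [])).2.2.length = k)
    ∧ (0 < k → ((s.take k).foldl (pvPassStep m L) (0, L.getD (PySem.List.pyGetD s 0 0) 0, [])).2.2.getD (k - 1) 0
        = ((s.take k).foldl (pvPassStep m L) (0, L.getD (PySem.List.pyGetD s 0 0) 0, [])).1
          + ((s.take k).foldl (pvPassStep m L) (0, L.getD (PySem.List.pyGetD s 0 0) 0, [])).2.1)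
    ∧ (∀ jb mm : Int,
        (((PySem.List.pyRange 0 (k : Int) 1).foldl (pvBody s m) D0).getD (jb, mm) 0)
          = if mm = m
            then (pvLastPre s ((s.take k).foldl (pvPassStep m L) (0, L.getD (PySem.List.pyGetD s 0 0) 0, [])).2.2 k).getD jb 0
            else D0.getD (jb, mm) 0) := by
  intro k
  induction k with
  | zero =>
    intro _
    refine ⟨rfl, fun h => absurd h (lt_irrefl 0), fun jb mm => ?_⟩
    rw [show ((0 : Nat) : Int) = 0 from rfl, PySem.List.pyRange_one_eq_nil le_rfl]
    simp only [List.foldl_nil]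
    by_cases hmm : mm = m
    · rw [if_pos hmm]
      simp [pvLastPre, PySem.Dict.getD_empty, hmm, hzero jb]
    · rw [if_neg hmm]
  | succ n ih =>
    intro hn1
    have hn : n < s.length := by omega
    obtain ⟨IHa, IHb, IHc⟩ := ih (by omega)
    rw [pv_take_succ hn]
    rw [show ((n + 1 : Nat) : Int) = (n : Int) + 1 by push_cast; ring,
      PySem.List.pyRange_one_succ_right (by exact_mod_cast Nat.zero_le n),
      List.foldl_append, List.foldl_append, List.foldl_cons, List.foldl_cons,
      List.foldl_nil, List.foldl_nil]
    set R := (s.take n).foldl (pvPassStep m L) (0, L.getD (PySem.List.pyGetD s 0 0) 0, []) with hR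
    set DA := (PySem.List.pyRange 0 (n : Int) 1).foldl (pvBody s m) D0 with hDA
    have hval : pvBody s m DA (n : Int) =
        DA.insert (s.getD n 0, m) (R.1 + pvP.getD (s.getD n 0, m) 0
          + max R.2.1 (L.getD (s.getD n 0) 0 - R.1)) := by
      simp only [pvBody, hm, Bool.false_eq_true, if_false, PySem.List.pyGetD_natCast]
      by_cases h0 : ((n : Nat) : Int) = 0
      · have hn0 : n = 0 := by omega
        rw [if_pos (by simp [h0])]
        have hR1 : R.1 = 0 := by rw [hR, hn0]; rfl
        have hR2 : R.2.1 = L.getD (s.getD 0 0) 0 := by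
          rw [hR, hn0]
          simp [PySem.List.pyGetD_zero]
        rw [IHc (s.getD n 0) (m - 1), if_neg (by omega), hprev, hn0, hR1, hR2]
        congr 1
        omega
      · have hpos : 0 < n := by omega
        rw [if_neg (by simp only [beq_iff_eq]; omega)]
        rw [show ((n : Int) - 1) = ((n - 1 : Nat) : Int) by push_cast [hpos]; omega,
          PySem.List.pyGetD_natCast, IHc (s.getD (n - 1) 0) m, if_pos rfl,
          pvLastPre_getD_last s R.2.2 n hpos, IHb hpos,
          IHc (s.getD n 0) (m - 1), if_neg (by omega), hprev]
        congr 1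
        omega
    have hstep : pvPassStep m L R (s.getD n 0) =
        (R.1 + pvP.getD (s.getD n 0, m) 0, max R.2.1 (L.getD (s.getD n 0) 0 - R.1),
          R.2.2 ++ [R.1 + pvP.getD (s.getD n 0, m) 0 + max R.2.1 (L.getD (s.getD n 0) 0 - R.1)]) := by
      rfl
    rw [hstep]
    refine ⟨by simp [IHa], ?_, ?_⟩
    · intro _
      simp only []
      rw [List.getD_eq_getElem _ _ (by simp [IHa]),
        List.getElem_append_right (by omega)]
      simp [IHa]
    · intro jb mm
      rw [hval, PySem.Dict.getD_insert]
      have hlp : pvLastPre s (R.2.2 ++ [R.1 + pvP.getD (s.getD n 0, m) 0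
            + max R.2.1 (L.getD (s.getD n 0) 0 - R.1)]) (n + 1)
          = (pvLastPre s R.2.2 n).insert (s.getD n 0)
              (R.1 + pvP.getD (s.getD n 0, m) 0 + max R.2.1 (L.getD (s.getD n 0) 0 - R.1)) :=
        pvLastPre_append s R.2.2 _ n IHa
      by_cases heq : (jb, mm) = (s.getD n 0, m)
      · obtain ⟨h1, h2⟩ := Prod.mk.injEq .. ▸ heq
        rw [if_pos heq, h2, if_pos rfl, hlp, h1, PySem.Dict.getD_insert_self]
      · rw [if_neg heq, IHc jb mm]
        by_cases hmm : mm = m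
        · have hjb : jb ≠ s.getD n 0 := fun h => heq (by rw [h, hmm])
          rw [if_pos hmm, if_pos hmm, hlp, PySem.Dict.getD_insert_of_ne _ _ _ hjb]
        · rw [if_neg hmm, if_neg hmm]

-- A's final dict lookup equals B's returned last list element, for any nonempty sequence
theorem pv_fill_eq_makespan (s : List Int) (hne : s ≠ []) :
    (pvFill s).getD (PySem.List.pyGetD s (-1) 0, pvNumM) 0 = pvMakespan s := by
  have hn : 0 < s.length := List.length_pos_iff.mpr hne
  have htake : s.take s.length = s := List.take_length
  -- machine 1
  obtain ⟨a1, -, c1⟩ := pv_pass1_inv s s.length le_rfl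
  rw [htake] at a1 c1
  set C1 := (s.foldl pvRow1Step (0, [])).2 with hC1
  set D1 := (PySem.List.pyRange 0 (s.length : Int) 1).foldl (pvBody s 1) PySem.Dict.empty
    with hD1
  -- machine 2
  obtain ⟨a2, -, c2⟩ := pv_passm_inv s 2 rfl D1 (pvLastD s C1)
    (fun jb => by rw [show (2 : Int) - 1 = 1 by norm_num, c1 jb 1, if_pos rfl, pvLastD_eq s C1])
    (fun jb => by rw [c1 jb 2, if_neg (by norm_num)]) s.length le_rfl
  rw [htake] at a2 c2
  have a2' : (pvPass s 2 (pvLastD s C1)).length = s.length := a2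
  set C2 := pvPass s 2 (pvLastD s C1) with hC2
  set D2 := (PySem.List.pyRange 0 (s.length : Int) 1).foldl (pvBody s 2) D1 with hD2
  -- machine 3
  obtain ⟨a3, -, c3⟩ := pv_passm_inv s 3 rfl D2 (pvLastD s C2)
    (fun jb => by
      rw [show (3 : Int) - 1 = 2 by norm_num, c2 jb 2, if_pos rfl, pvLastD_eq s C2]; rfl)
    (fun jb => by
      rw [c2 jb 3, if_neg (by norm_num), c1 jb 3, if_neg (by norm_num)]) s.length le_rfl
  rw [htake] at a3 c3
  have a3' : (pvPass s 3 (pvLastD s C2)).length = s.length := a3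
  set C3 := pvPass s 3 (pvLastD s C2) with hC3
  set D3 := (PySem.List.pyRange 0 (s.length : Int) 1).foldl (pvBody s 3) D2 with hD3
  -- machine 4
  obtain ⟨a4, -, c4⟩ := pv_passm_inv s 4 rfl D3 (pvLastD s C3)
    (fun jb => by
      rw [show (4 : Int) - 1 = 3 by norm_num, c3 jb 3, if_pos rfl, pvLastD_eq s C3]; rfl)
    (fun jb => by
      rw [c3 jb 4, if_neg (by norm_num), c2 jb 4, if_neg (by norm_num),
        c1 jb 4, if_neg (by norm_num)]) s.length le_rfl
  rw [htake] at a4 c4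
  have a4' : (pvPass s 4 (pvLastD s C3)).length = s.length := a4
  set C4 := pvPass s 4 (pvLastD s C3) with hC4
  have hA : pvFill s = (PySem.List.pyRange 0 (s.length : Int) 1).foldl (pvBody s 4) D3 := rfl
  have hB : pvMakespan s = PySem.List.pyGetD C4 (-1) 0 := rfl
  have hC4ne : C4 ≠ [] := by
    intro h
    rw [h] at a4'
    simp at a4'
    omega
  have hidx : PySem.List.pyGetD s (-1) 0 = s.getD (s.length - 1) 0 := by
    rw [PySem.List.pyGetD_neg_one s 0 hne, List.getLast_eq_getElem hne,
      List.getD_eq_getElem _ _ (by omega)]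
  have hidxC : PySem.List.pyGetD C4 (-1) 0 = C4.getD (s.length - 1) 0 := by
    rw [PySem.List.pyGetD_neg_one C4 0 hC4ne, List.getLast_eq_getElem hC4ne,
      List.getD_eq_getElem _ _ (by rw [a4']; omega)]
    congr 1
    rw [a4']
  have hlast : (pvLastPre s C4 s.length).getD (s.getD (s.length - 1) 0) 0
      = C4.getD (s.length - 1) 0 := pvLastPre_getD_last s C4 s.length hn
  rw [hA, hB, show pvNumM = 4 from rfl, c4 (PySem.List.pyGetD s (-1) 0) 4, if_pos rfl,
    hidx, hidxC]
  exact hlast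

-- ===== VERDICT (by name: the statement is the Claim_ definition above) =====
theorem sortNEHFirstIteration_spec : Claim_equal_sortNEHFirstIteration := by
  intro seq _ hpre
  obtain ⟨hne, -⟩ := hpre
  show sortNEHFirstIteration seq = sortNEHFirstIteration_alt seq
  have hne' : seq.reverse ≠ [] := by simpa using hne
  simp only [sortNEHFirstIteration, sortNEHFirstIteration_alt]
  rw [pv_fill_eq_makespan seq hne, pv_fill_eq_makespan seq.reverse hne']
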